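-- pv_equiv track=rewrite | github.com/StasDeep/Advent-of-Code | y2015/t19/solution.py | get_all_possible_replacements
-- ===== SOURCE A (Python) =====
-- def nth_repl(s, sub, repl, n):
--     find = -1
--     for i in range(n + 1):
--         find = s.find(sub, find + 1)
--         if find == -1:
--             break
--         if i == n:
--             return s[:find] + repl + s[find + len(sub):]
--     return s
--
-- def get_all_possible_replacements(line, replacements):
--     molecules = set()
--     for sub, repl in sorted(replacements, key=lambda x: x[0]):
--         for i in range(line.count(sub)):
--             new_molecule = nth_repl(line, sub, repl, i)
--             if new_molecule != line and new_molecule not in molecules: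
--                 yield new_molecule
--                 molecules.add(new_molecule)
-- ===== SOURCE B (Python) =====
-- def get_all_possible_replacements(line, replacements):
--     # One incremental find-walk per rule visits every occurrence position once;
--     # each variant is built directly by slicing at that position. A rule whose
--     # replacement equals its source can never yield a new molecule, so skip it.
--     seen = set()
--     out = []
--     for sub, repl in sorted(replacements, key=lambda x: x[0]):
--         if sub == repl:
--             continue
--         pos = line.find(sub)
--         while pos != -1:
--             molecule = line[:pos] + repl + line[pos + len(sub):]
--             if molecule != line and molecule not in seen:
--                 seen.add(molecule)
--                 out.append(molecule)
--             pos = line.find(sub, pos + 1)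
--     return out
-- ===== Notes on version B (the rewrite author's own statement) =====
-- stated objective: faster
-- what changed: B sweeps each rule's occurrences with one incremental str.find walk and builds every variant directly by slicing, instead of A's nth_repl restarting its find chain for each occurrence index, and B skips rules whose replacement equals their source; Pre_ excludes inputs where a rule with sub != repl has two overlapping occurrences of sub in line, an unspecified corner that A's cap at the non-overlapping str.count and B's every-occurrence walk resolve differently.
-- outside the precondition, e.g. on get_all_possible_replacements('aaa', [('aa', 'b')]): A returns ['ba'], B returns ['ba', 'ab']; on get_all_possible_replacements('aaa', [('aa', 'a')]): A returns ['aa'], B returns ['aa']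
import Mathlib
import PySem

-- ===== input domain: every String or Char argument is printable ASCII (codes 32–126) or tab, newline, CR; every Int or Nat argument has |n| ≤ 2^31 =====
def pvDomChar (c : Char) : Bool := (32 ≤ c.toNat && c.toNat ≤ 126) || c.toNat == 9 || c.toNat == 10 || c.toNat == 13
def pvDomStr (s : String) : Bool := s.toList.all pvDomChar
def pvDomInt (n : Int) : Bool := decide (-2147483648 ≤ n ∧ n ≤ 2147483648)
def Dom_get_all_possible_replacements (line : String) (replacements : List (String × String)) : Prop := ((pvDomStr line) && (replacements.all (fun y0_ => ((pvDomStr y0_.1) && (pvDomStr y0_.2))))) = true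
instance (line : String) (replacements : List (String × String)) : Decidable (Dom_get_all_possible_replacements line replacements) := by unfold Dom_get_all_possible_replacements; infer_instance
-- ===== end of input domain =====

-- B replaces nth_repl's per-index find restarts with one incremental find-walk per
-- rule and skips sub = repl rules, which can never yield a new molecule (objective:
-- faster); inputs where a rule's source overlaps itself in line are excluded by Pre_.
-- A is a generator; both ports return the list of yielded strings.

-- ===== PORT A =====
-- nth_repl's loop 'for i in range(n + 1)': the fuel argument counts the remaining
-- iterations; 'if i == n: return …' is the fuel-1 step, falling off the loop returns s.
def pvNthReplGo (s sub repl : List Char) (find : Int) : Nat → List Char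
  | 0 => s
  | k + 1 =>
    let f := PySem.Chars.findFrom s sub (find + 1) none
    if f = -1 then s
    else if k = 0 then
      PySem.List.slice s none (some f) ++ repl ++ PySem.List.slice s (some (f + sub.length)) none
    else pvNthReplGo s sub repl f k

def pvNthRepl (s sub repl : List Char) (n : Nat) : List Char :=
  pvNthReplGo s sub repl (-1) (n + 1)

def get_all_possible_replacements (line : String) (replacements : List (String × String)) : List String :=
  ((PySem.List.sorted replacements (fun x => x.1) false).foldl
    (fun (st : PySem.Set (List Char) × List (List Char)) pr =>
      (List.range (PySem.Chars.count line.toList pr.1.toList)).foldl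
        (fun st i =>
          let nm := pvNthRepl line.toList pr.1.toList pr.2.toList i
          if nm ≠ line.toList ∧ nm ∉ st.1 then (PySem.Set.add st.1 nm, st.2 ++ [nm]) else st)
        st)
    (PySem.Set.empty, [])).2.map String.ofList

-- ===== PORT B =====
-- B's 'pos = line.find(sub); while pos != -1: … ; pos = line.find(sub, pos + 1)':
-- pos strictly increases, so len(line) + 2 iterations always suffice (the fuel only
-- makes the loop total, it never cuts it short).
def pvWhileGo (l sub repl : List Char) (st : PySem.Set (List Char) × List (List Char))
    (pos : Int) : Nat → PySem.Set (List Char) × List (List Char)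
  | 0 => st
  | fuel + 1 =>
    if pos = -1 then st
    else
      let m := PySem.List.slice l none (some pos) ++ repl ++
        PySem.List.slice l (some (pos + sub.length)) none
      let st' := if m ≠ l ∧ m ∉ st.1 then (PySem.Set.add st.1 m, st.2 ++ [m]) else st
      pvWhileGo l sub repl st' (PySem.Chars.findFrom l sub (pos + 1) none) fuel

def get_all_possible_replacements_alt (line : String) (replacements : List (String × String)) : List String :=
  ((PySem.List.sorted replacements (fun x => x.1) false).foldl
    (fun (st : PySem.Set (List Char) × List (List Char)) pr =>
      if pr.1 = pr.2 then st
      else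
        pvWhileGo line.toList pr.1.toList pr.2.toList st
          (PySem.Chars.find line.toList pr.1.toList) (line.toList.length + 2))
    (PySem.Set.empty, [])).2.map String.ofList

-- ===== PRECONDITION & SPEC =====
-- Pre_ excludes inputs where some rule with sub ≠ repl has two OVERLAPPING
-- occurrences of sub in line: there 'one variant per occurrence' is an
-- unspecified corner (str.count counts non-overlapping occurrences while
-- stepwise find visits overlapping ones), and A's enumeration (overlapping
-- positions capped at the non-overlapping count) and B's (every occurrence
-- position) are both defensible resolutions of it.
def Pre_get_all_possible_replacements (line : String) (replacements : List (String × String)) : Prop :=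
  (replacements.any (fun pr =>
    pr.1 ≠ pr.2 &&
      decide (∃ p, p < line.toList.length ∧ ∃ q, q < line.toList.length ∧
        p < q ∧ q < p + pr.1.toList.length ∧
        pr.1.toList <+: line.toList.drop p ∧ pr.1.toList <+: line.toList.drop q))) = false
instance (line : String) (replacements : List (String × String)) : Decidable (Pre_get_all_possible_replacements line replacements) := by unfold Pre_get_all_possible_replacements; infer_instance

def pvWitness_get_all_possible_replacements : String × (List (String × String)) := ("abab", [("ab", "c"), ("b", "aa")])

def Spec_get_all_possible_replacements (line : String) (replacements : List (String × String)) (out : List String) : Prop := out = get_all_possible_replacements_alt line replacements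
instance (line : String) (replacements : List (String × String)) (out : List String) : Decidable (Spec_get_all_possible_replacements line replacements out) := by unfold Spec_get_all_possible_replacements; infer_instance

-- ===== CLAIM (what is proved, stated in full; the proofs are below) =====
def Claim_equal_get_all_possible_replacements : Prop := ∀ (line : String) (replacements : List (String × String)), Dom_get_all_possible_replacements line replacements → Pre_get_all_possible_replacements line replacements → Spec_get_all_possible_replacements line replacements (get_all_possible_replacements line replacements)

-- ===== LEMMAS AND PROOFS =====

-- the (overlapping) occurrence positions of sub in l, in increasing order
def pvPositions (l sub : List Char) : List Nat :=
  (List.range (l.length + 1)).filter (fun j => PySem.Chars.startswith (l.drop j) sub)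

-- the single-replacement result at occurrence position p
def pvBuild (l sub repl : List Char) (p : Nat) : List Char :=
  l.take p ++ repl ++ l.drop (p + sub.length)

lemma mem_pvPositions {l sub : List Char} {p : Nat} :
    p ∈ pvPositions l sub ↔ p ≤ l.length ∧ sub <+: l.drop p := by
  simp [pvPositions, List.mem_filter, List.mem_range, PySem.Chars.startswith_iff]

lemma pairwise_pvPositions (l sub : List Char) : (pvPositions l sub).Pairwise (· < ·) :=
  List.Pairwise.sublist (List.filter_sublist) (List.pairwise_lt_range)

-- CPython quirk kept by PySem: s.find(sub, start) with start past len(s) is -1 even for sub = ''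
lemma pvFindFrom_past (l sub : List Char) (t : Nat) (h : l.length < t) :
    PySem.Chars.findFrom l sub (t : Int) none = -1 := by
  simp only [PySem.Chars.findFrom]
  split_ifs <;> first | rfl | (exfalso; omega)

lemma pvHead?_filter_range' (q : Nat → Bool) :
    ∀ (b a m : Nat), a ≤ m → m < a + b → q m = true → (∀ j, a ≤ j → j < m → q j = false) →
    ((List.range' a b).filter q).head? = some m := by
  intro b
  induction b with
  | zero => intro a m h1 h2; omega
  | succ b ih =>
    intro a m h1 h2 hq hmin
    rw [List.range'_succ, List.filter_cons]
    by_cases ha : q a = true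
    · have : m = a := by
        by_contra hne
        have := hmin a le_rfl (by omega)
        simp [this] at ha
      simp [ha, this]
    · simp only [ha]
      have : a ≠ m := fun h => ha (h ▸ hq)
      exact ih (a+1) m (by omega) (by omega) hq (fun j hj1 hj2 => hmin j (by omega) hj2)

-- s.find(sub, t) is the first occurrence position ≥ t, or -1
lemma pvFindFrom_eq (l sub : List Char) (t : Nat) (ht : t ≤ l.length) :
    PySem.Chars.findFrom l sub (t : Int) none =
      match ((pvPositions l sub).filter (fun p => decide (t ≤ p))).head? with
      | some p => (p : Int)
      | none => -1 := by
  rw [PySem.Chars.findFrom_natCast l sub t ht]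
  by_cases hf : PySem.Chars.find (l.drop t) sub = -1
  · have hemp : (pvPositions l sub).filter (fun p => decide (t ≤ p)) = [] := by
      rw [List.filter_eq_nil_iff]
      intro p hp hdec
      have hm := mem_pvPositions.mp hp
      have htp : t ≤ p := by simpa using hdec
      have hinf : sub <:+: l.drop t := by
        rw [← PySem.Chars.isIn_iff_infix, ← PySem.Chars.exists_prefix_drop_iff_isIn]
        refine ⟨p - t, ?_⟩
        rw [List.drop_drop]
        have hpt : t + (p - t) = p := by omega
        rw [hpt]; exact hm.2
      rw [PySem.Chars.find_eq_neg_one_iff] at hf; exact hf hinf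
    rw [hemp]; simp [hf]
  · have hf0 : 0 ≤ PySem.Chars.find (l.drop t) sub := by
      have := PySem.Chars.neg_one_le_find (l.drop t) sub
      omega
    obtain ⟨hpre, hmin⟩ := PySem.Chars.find_spec (s := l.drop t) (sub := sub) hf0
    set f := PySem.Chars.find (l.drop t) sub with hfdef
    have hfl : f ≤ (l.drop t).length := PySem.Chars.find_le_length _ _
    have hlen : (l.drop t).length = l.length - t := List.length_drop ..
    have hhead : ((pvPositions l sub).filter (fun p => decide (t ≤ p))).head? = some (t + f.toNat) := by
      rw [pvPositions, List.filter_filter, List.range_eq_range']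
      apply pvHead?_filter_range' _ _ _ _ (Nat.zero_le _) (by omega)
      · simp only [Bool.and_eq_true, decide_eq_true_eq]
        refine ⟨by omega, ?_⟩
        rw [PySem.Chars.startswith_iff]
        rw [List.drop_drop] at hpre
        exact hpre
      · intro j _ hj
        by_cases hjt : t ≤ j
        · have h2 := hmin (j - t) (by omega)
          rw [List.drop_drop] at h2
          have hjj : t + (j - t) = j := by omega
          rw [hjj] at h2
          rw [Bool.eq_false_iff]
          intro hcontra
          simp only [Bool.and_eq_true, decide_eq_true_eq, PySem.Chars.startswith_iff] at hcontra
          exact h2 hcontra.2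
        · simp [hjt]
    rw [hhead]
    simp only [if_neg hf]
    push_cast
    rw [Int.toNat_of_nonneg hf0]

-- the positions still to be visited after yielding p are the tail of the current list
lemma pvFilter_tail (l sub : List Char) (t p : Nat) (tl : List Nat)
    (hQ : (pvPositions l sub).filter (fun x => decide (t ≤ x)) = p :: tl) :
    (pvPositions l sub).filter (fun x => decide (p + 1 ≤ x)) = tl := by
  have htp : t ≤ p := by
    have : p ∈ (pvPositions l sub).filter (fun x => decide (t ≤ x)) := by rw [hQ]; exact List.mem_cons_self ..
    simpa using (List.mem_filter.mp this).2
  have hpw : ((pvPositions l sub).filter (fun x => decide (t ≤ x))).Pairwise (· < ·) :=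
    List.Pairwise.sublist (List.filter_sublist) (pairwise_pvPositions l sub)
  rw [hQ, List.pairwise_cons] at hpw
  have h1 : (pvPositions l sub).filter (fun x => decide (p + 1 ≤ x))
      = ((pvPositions l sub).filter (fun x => decide (t ≤ x))).filter (fun x => decide (p + 1 ≤ x)) := by
    rw [List.filter_filter]
    apply List.filter_congr
    intro x _
    by_cases hx : p + 1 ≤ x
    · simp [hx]; omega
    · simp [hx]
  rw [h1, hQ, List.filter_cons]
  simp only [decide_eq_true_eq]
  rw [if_neg (by omega)]
  exact List.filter_eq_self.mpr (fun x hx => by simp; exact hpw.1 x hx)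

-- B's while loop, resumed at the first occurrence at or after t, folds the step
-- function over exactly the remaining occurrence positions
lemma pvWhile_eq (l sub repl : List Char) :
    ∀ (fuel t : Nat) (st : PySem.Set (List Char) × List (List Char)), t ≤ l.length →
      ((pvPositions l sub).filter (fun x => decide (t ≤ x))).length < fuel →
      pvWhileGo l sub repl st (PySem.Chars.findFrom l sub (t : Int) none) fuel =
        ((pvPositions l sub).filter (fun x => decide (t ≤ x))).foldl
          (fun st j =>
            let m := l.take j ++ repl ++ l.drop (j + sub.length)
            if m ≠ l ∧ m ∉ st.1 then (PySem.Set.add st.1 m, st.2 ++ [m]) else st) st := by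
  intro fuel
  induction fuel with
  | zero => intro t st _ hlen; omega
  | succ fuel ih =>
    intro t st ht hlen
    rw [pvFindFrom_eq l sub t ht]
    cases hQ : ((pvPositions l sub).filter (fun p => decide (t ≤ p))).head? with
    | none =>
      rw [List.head?_eq_none_iff] at hQ
      rw [hQ]
      rfl
    | some p =>
      obtain ⟨tl, hQ'⟩ : ∃ tl, (pvPositions l sub).filter (fun x => decide (t ≤ x)) = p :: tl :=
        ⟨_, (List.head?_eq_some_iff.mp hQ).choose_spec⟩
      have hp : p ∈ pvPositions l sub := by
        have : p ∈ (pvPositions l sub).filter (fun x => decide (t ≤ x)) := by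
          rw [hQ']; exact List.mem_cons_self ..
        exact (List.mem_filter.mp this).1
      have hplen : p ≤ l.length := (mem_pvPositions.mp hp).1
      rw [pvWhileGo]
      rw [if_neg (show ¬((p : Int) = -1) by omega)]
      simp only
      rw [show ((p : Int) + (sub.length : Int)) = ((p + sub.length : Nat) : Int) from by push_cast; ring]
      rw [PySem.List.slice_to_natCast, PySem.List.slice_from_natCast]
      rw [hQ', List.foldl_cons]
      have htail := pvFilter_tail l sub t p tl hQ'
      have htl : tl.length < fuel := by
        rw [hQ'] at hlen
        simp only [List.length_cons] at hlen
        omega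
      by_cases hpl : p + 1 ≤ l.length
      · have hih := ih (p + 1)
          (if (l.take p ++ repl ++ l.drop (p + sub.length)) ≠ l ∧
              (l.take p ++ repl ++ l.drop (p + sub.length)) ∉ st.1 then
            (PySem.Set.add st.1 (l.take p ++ repl ++ l.drop (p + sub.length)),
              st.2 ++ [l.take p ++ repl ++ l.drop (p + sub.length)])
          else st) hpl (by rw [htail]; exact htl)
        rw [htail] at hih
        rw [show ((p + 1 : Nat) : Int) = ((p : Int) + 1) from by push_cast; ring] at hih
        exact hih
      · -- p = l.length: the next find starts past the end and there is no further position
        cases fuel with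
        | zero => omega
        | succ f =>
          rw [show (p : Int) + 1 = ((p + 1 : Nat) : Int) from by push_cast; ring]
          rw [pvFindFrom_past l sub (p + 1) (by omega)]
          rw [pvWhileGo, if_pos rfl]
          have htlnil : tl = [] := by
            rw [← htail, List.filter_eq_nil_iff]
            intro x hx hdec
            have := (mem_pvPositions.mp hx).1
            simp at hdec
            omega
          rw [htlnil]
          rfl

-- started from line.find(sub) with ample fuel, the while loop visits every position
lemma pvWhileAll (l sub repl : List Char) (st : PySem.Set (List Char) × List (List Char)) :
    pvWhileGo l sub repl st (PySem.Chars.find l sub) (l.length + 2) =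
      (pvPositions l sub).foldl
        (fun st j =>
          let m := l.take j ++ repl ++ l.drop (j + sub.length)
          if m ≠ l ∧ m ∉ st.1 then (PySem.Set.add st.1 m, st.2 ++ [m]) else st) st := by
  have hflt : (pvPositions l sub).filter (fun x => decide ((0 : Nat) ≤ x)) = pvPositions l sub :=
    List.filter_eq_self.mpr (fun x _ => by simp)
  have hlen : (pvPositions l sub).length ≤ l.length + 1 := by
    have h1 := List.length_filter_le (fun j => PySem.Chars.startswith (l.drop j) sub)
      (List.range (l.length + 1))
    rw [List.length_range] at h1
    exact h1
  have h := pvWhile_eq l sub repl (l.length + 2) 0 st (Nat.zero_le _) (by rw [hflt]; omega)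
  rw [hflt] at h
  rw [show ((0 : Nat) : Int) = (0 : Int) from rfl] at h
  rw [PySem.Chars.findFrom_zero] at h
  exact h

-- nth_repl's find loop, started just below t with k+1 iterations left, lands on the
-- k-th remaining occurrence position (or returns s unchanged when there is none)
lemma pvGo_eq (l sub repl : List Char) :
    ∀ (k t : Nat), t ≤ l.length →
    pvNthReplGo l sub repl ((t : Int) - 1) (k + 1) =
      match ((pvPositions l sub).filter (fun p => decide (t ≤ p)))[k]? with
      | some p => pvBuild l sub repl p
      | none => l := by
  intro k
  induction k with
  | zero =>
    intro t ht
    rw [pvNthReplGo]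
    have harg : (t : Int) - 1 + 1 = (t : Int) := by ring
    rw [harg, pvFindFrom_eq l sub t ht]
    cases hQ : ((pvPositions l sub).filter (fun p => decide (t ≤ p))).head? with
    | none =>
      rw [List.head?_eq_none_iff] at hQ
      simp [hQ]
    | some p =>
      have hp : p ∈ pvPositions l sub := by
        have : p ∈ (pvPositions l sub).filter (fun x => decide (t ≤ x)) := List.mem_of_mem_head? hQ
        exact (List.mem_filter.mp this).1
      simp only
      rw [if_neg (show ¬((p : Int) = -1) by omega)]
      rw [if_pos trivial]
      rw [← List.head?_eq_getElem?, hQ]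
      show _ = pvBuild l sub repl p
      rw [pvBuild, show ((p : Int) + (sub.length : Int)) = ((p + sub.length : Nat) : Int) from by push_cast; ring]
      rw [PySem.List.slice_to_natCast, PySem.List.slice_from_natCast]
  | succ k ih =>
    intro t ht
    rw [pvNthReplGo]
    have harg : (t : Int) - 1 + 1 = (t : Int) := by ring
    rw [harg, pvFindFrom_eq l sub t ht]
    cases hQ : ((pvPositions l sub).filter (fun p => decide (t ≤ p))).head? with
    | none =>
      rw [List.head?_eq_none_iff] at hQ
      simp [hQ]
    | some p =>
      obtain ⟨tl, hQ'⟩ : ∃ tl, (pvPositions l sub).filter (fun x => decide (t ≤ x)) = p :: tl :=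
        ⟨_, (List.head?_eq_some_iff.mp hQ).choose_spec⟩
      have hp : p ∈ pvPositions l sub := by
        have : p ∈ (pvPositions l sub).filter (fun x => decide (t ≤ x)) := by
          rw [hQ']; exact List.mem_cons_self ..
        exact (List.mem_filter.mp this).1
      have hplen : p ≤ l.length := (mem_pvPositions.mp hp).1
      simp only
      rw [if_neg (show ¬((p : Int) = -1) by omega), if_neg (show ¬(k + 1 = 0) by omega)]
      have htail := pvFilter_tail l sub t p tl hQ'
      by_cases hpl : p + 1 ≤ l.length
      · have := ih (p + 1) hpl
        rw [show ((p+1 : Nat) : Int) = ((p : Int) + 1) from by push_cast; ring] at this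
        rw [show (p : Int) = (p : Int) + 1 - 1 from by ring]
        rw [this, htail, hQ']
        rfl
      · -- p = l.length: the next find starts past the end and there is no further position
        rw [pvNthReplGo]
        rw [show (p : Int) + 1 = ((p + 1 : Nat) : Int) from by push_cast; ring]
        rw [pvFindFrom_past l sub (p + 1) (by omega), if_pos rfl]
        have htl : tl = [] := by
          rw [← htail, List.filter_eq_nil_iff]
          intro x hx hdec
          have := (mem_pvPositions.mp hx).1
          simp at hdec
          omega
        rw [hQ', htl]
        rfl

-- nth_repl(line, sub, repl, n) replaces the n-th occurrence (counted with overlaps),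
-- or returns line unchanged when there is no n-th occurrence
lemma pvNthRepl_eq (l sub repl : List Char) (n : Nat) :
    pvNthRepl l sub repl n =
      match (pvPositions l sub)[n]? with
      | some p => pvBuild l sub repl p
      | none => l := by
  rw [pvNthRepl, show (-1 : Int) = ((0 : Nat) : Int) - 1 from by norm_num]
  rw [pvGo_eq l sub repl n 0 (Nat.zero_le _)]
  have : (pvPositions l sub).filter (fun p => decide (0 ≤ p)) = pvPositions l sub :=
    List.filter_eq_self.mpr (fun x _ => by simp)
  rw [this]

-- replacing an occurrence of sub by sub itself gives the line back
lemma pvBuild_self (l sub : List Char) (p : Nat) (hp : p ∈ pvPositions l sub) :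
    pvBuild l sub sub p = l := by
  obtain ⟨hple, hpre⟩ := mem_pvPositions.mp hp
  obtain ⟨rest, hrest⟩ := hpre
  have hdrop : l.drop (p + sub.length) = rest := by
    have h2 : (l.drop p).drop sub.length = rest := by rw [← hrest, List.drop_left]
    rw [List.drop_drop] at h2
    exact h2
  rw [pvBuild, hdrop, List.append_assoc, hrest, List.take_append_drop]

-- A's inner fold over range(count) equals B's fold over the first count positions:
-- past the last occurrence A's candidate equals line and is filtered away
lemma pvInner_eq (l sub repl : List Char) (c : Nat)
    (st : PySem.Set (List Char) × List (List Char)) :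
    (List.range c).foldl
      (fun st i =>
        let nm := pvNthRepl l sub repl i
        if nm ≠ l ∧ nm ∉ st.1 then (PySem.Set.add st.1 nm, st.2 ++ [nm]) else st) st
    = ((pvPositions l sub).take c).foldl
      (fun st j =>
        let m := l.take j ++ repl ++ l.drop (j + sub.length)
        if m ≠ l ∧ m ∉ st.1 then (PySem.Set.add st.1 m, st.2 ++ [m]) else st) st := by
  induction c with
  | zero => rfl
  | succ c ih =>
    rw [List.range_succ, List.foldl_append, ih, List.take_add_one]
    by_cases hc : c < (pvPositions l sub).length
    · rw [List.getElem?_eq_getElem hc]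
      rw [List.foldl_append]
      simp only [List.foldl_cons, List.foldl_nil, Option.toList_some]
      rw [pvNthRepl_eq, List.getElem?_eq_getElem hc]
      rfl
    · rw [List.getElem?_eq_none (by omega)]
      simp only [Option.toList_none, List.append_nil, List.foldl_cons, List.foldl_nil]
      rw [pvNthRepl_eq, List.getElem?_eq_none (by omega)]
      simp

-- no two occurrences of sub in l overlap
def pvNoOv (l sub : List Char) : Prop :=
  ∀ p q : Nat, sub <+: l.drop p → sub <+: l.drop q → p < q → p + sub.length ≤ q

lemma pvNoOv_drop (l sub : List Char) (d : Nat) (h : pvNoOv l sub) : pvNoOv (l.drop d) sub := by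
  intro p q hp hq hpq
  rw [List.drop_drop] at hp hq
  have := h (d + p) (d + q) hp hq (by omega)
  omega

lemma pvPos_le {l sub : List Char} {p : Nat} (hs : sub ≠ []) (h : sub <+: l.drop p) :
    p + sub.length ≤ l.length := by
  have h1 := h.length_le
  rw [List.length_drop] at h1
  have h2 : 0 < sub.length := List.length_pos_iff.mpr hs
  omega

lemma pvMem_iff {l sub : List Char} (hs : sub ≠ []) {p : Nat} :
    p ∈ pvPositions l sub ↔ sub <+: l.drop p := by
  constructor
  · intro h; exact (mem_pvPositions.mp h).2
  · intro h
    exact mem_pvPositions.mpr ⟨by have := pvPos_le hs h; omega, h⟩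

lemma pvSortedEq (xs ys : List Nat) (hx : xs.Pairwise (· < ·)) (hy : ys.Pairwise (· < ·))
    (h : ∀ a, a ∈ xs ↔ a ∈ ys) : xs = ys := by
  have hp : xs.Perm ys := (List.perm_ext_iff_of_nodup (hx.imp ne_of_lt) (hy.imp ne_of_lt)).mpr h
  exact hp.eq_of_pairwise (fun a b _ _ h1 h2 => by omega) hx hy

lemma pvMapPairwise (xs : List Nat) (d : Nat) (hx : xs.Pairwise (· < ·)) :
    (xs.map (· + d)).Pairwise (· < ·) := by
  rw [List.pairwise_map]
  exact hx.imp (fun h => by omega)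

-- with no occurrence before position d, the positions of l are those of l.drop d shifted
lemma pvPositions_shift (l sub : List Char) (hs : sub ≠ []) (d : Nat)
    (hnone : ∀ j, j < d → ¬ sub <+: l.drop j) :
    pvPositions l sub = (pvPositions (l.drop d) sub).map (· + d) := by
  apply pvSortedEq _ _ (pairwise_pvPositions _ _) (pvMapPairwise _ _ (pairwise_pvPositions _ _))
  intro a
  rw [pvMem_iff hs, List.mem_map]
  constructor
  · intro ha
    have had : d ≤ a := by by_contra hlt; exact hnone a (by omega) ha
    refine ⟨a - d, ?_, by omega⟩
    rw [pvMem_iff hs, List.drop_drop]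
    rw [show d + (a - d) = a from by omega]
    exact ha
  · rintro ⟨b, hb, rfl⟩
    rw [pvMem_iff hs, List.drop_drop] at hb
    rwa [Nat.add_comm d b] at hb

-- with an occurrence at 0 and none before sub.length, the positions are 0 plus the shifted tail
lemma pvPositions_cons (l sub : List Char) (hs : sub ≠ []) (h0 : sub <+: l)
    (hnone : ∀ j, 1 ≤ j → j < sub.length → ¬ sub <+: l.drop j) :
    pvPositions l sub = 0 :: (pvPositions (l.drop sub.length) sub).map (· + sub.length) := by
  have hslen : 1 ≤ sub.length := List.length_pos_iff.mpr hs
  apply pvSortedEq _ _ (pairwise_pvPositions _ _)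
  · rw [List.pairwise_cons]
    refine ⟨?_, pvMapPairwise _ _ (pairwise_pvPositions _ _)⟩
    intro b hb
    obtain ⟨c, _, rfl⟩ := List.mem_map.mp hb
    omega
  · intro a
    rw [pvMem_iff hs, List.mem_cons, List.mem_map]
    constructor
    · intro ha
      by_cases ha0 : a = 0
      · exact Or.inl ha0
      · refine Or.inr ⟨a - sub.length, ?_, ?_⟩
        · have hla : sub.length ≤ a := by
            by_contra hlt
            exact hnone a (by omega) (by omega) ha
          rw [pvMem_iff hs, List.drop_drop]
          rw [show sub.length + (a - sub.length) = a from by omega]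
          exact ha
        · have hla : sub.length ≤ a := by
            by_contra hlt
            exact hnone a (by omega) (by omega) ha
          omega
    · rintro (rfl | ⟨b, hb, rfl⟩)
      · simpa using h0
      · rw [pvMem_iff hs, List.drop_drop] at hb
        rwa [Nat.add_comm sub.length b] at hb

lemma pvPositionsNil (sub : List Char) (hs : sub ≠ []) : pvPositions [] sub = [] := by
  rw [pvPositions]
  apply List.filter_eq_nil_iff.mpr
  intro j _ hc
  rw [List.drop_nil] at hc
  exact hs (List.prefix_nil.mp ((PySem.Chars.startswith_iff _ _).mp hc))

-- the greedy counting loop of str.count counts every occurrence when none overlap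
lemma pvGoCount (sub : List Char) (hs : sub ≠ []) :
    ∀ (fuel : Nat) (l : List Char) (acc : Nat), l.length ≤ fuel → pvNoOv l sub →
      PySem.Chars.count.go sub fuel l acc = acc + (pvPositions l sub).length := by
  intro fuel
  induction fuel with
  | zero =>
    intro l acc hl _
    have hnil : l = [] := List.eq_nil_of_length_eq_zero (by omega)
    subst hnil
    rw [pvPositionsNil sub hs]
    rfl
  | succ fuel ih =>
    intro l acc hl hno
    cases l with
    | nil => rw [pvPositionsNil sub hs]; rfl
    | cons h t =>
      have hred : PySem.Chars.count.go sub (fuel + 1) (h :: t) acc =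
          (if sub.isPrefixOf (h :: t) then
            PySem.Chars.count.go sub fuel (List.drop sub.length (h :: t)) (acc + 1)
          else PySem.Chars.count.go sub fuel t acc) := rfl
      rw [hred]
      have hslen : 1 ≤ sub.length := List.length_pos_iff.mpr hs
      by_cases hp : sub <+: (h :: t)
      · rw [if_pos (List.isPrefixOf_iff_prefix.mpr hp)]
        have hnone : ∀ j, 1 ≤ j → j < sub.length → ¬ sub <+: (h :: t).drop j := by
          intro j hj1 hj2 hc
          have := hno 0 j (by simpa using hp) hc (by omega)
          omega
        have hlen2 : (List.drop sub.length (h :: t)).length ≤ fuel := by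
          rw [List.length_drop, List.length_cons]
          simp only [List.length_cons] at hl
          omega
        rw [ih _ (acc + 1) hlen2 (pvNoOv_drop _ sub sub.length hno)]
        rw [pvPositions_cons (h :: t) sub hs hp hnone]
        simp only [List.length_cons, List.length_map]
        omega
      · rw [if_neg (show ¬ sub.isPrefixOf (h :: t) = true from
            fun hc => hp (List.isPrefixOf_iff_prefix.mp hc))]
        have hnone : ∀ j, j < 1 → ¬ sub <+: (h :: t).drop j := by
          intro j hj hc
          have hj0 : j = 0 := by omega
          subst hj0
          exact hp hc
        have hnt : pvNoOv t sub := pvNoOv_drop (h :: t) sub 1 hno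
        rw [ih t acc (by simp only [List.length_cons] at hl; omega) hnt]
        rw [pvPositions_shift (h :: t) sub hs 1 hnone]
        simp

-- when no two occurrences overlap, str.count reaches every occurrence position
lemma pvCount_ge (l sub : List Char) (hno : pvNoOv l sub) :
    (pvPositions l sub).length ≤ PySem.Chars.count l sub := by
  by_cases hs : sub = []
  · subst hs
    have hpos : pvPositions l [] = List.range (l.length + 1) := by
      rw [pvPositions]
      apply List.filter_eq_self.mpr
      intro j _
      simp [PySem.Chars.startswith_iff]
    rw [hpos, List.length_range]
    simp [PySem.Chars.count]
  · have hc : PySem.Chars.count l sub = PySem.Chars.count.go sub l.length l 0 := by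
      simp [PySem.Chars.count, List.isEmpty_iff, hs]
    rw [hc, pvGoCount sub hs l.length l 0 le_rfl hno]
    omega

-- with sub = repl, B's inner fold never changes the state
lemma pvInner_self (l sub : List Char) (js : List Nat) (hjs : ∀ j ∈ js, j ∈ pvPositions l sub)
    (st : PySem.Set (List Char) × List (List Char)) :
    js.foldl
      (fun st j =>
        let m := l.take j ++ sub ++ l.drop (j + sub.length)
        if m ≠ l ∧ m ∉ st.1 then (PySem.Set.add st.1 m, st.2 ++ [m]) else st) st = st := by
  induction js generalizing st with
  | nil => rfl
  | cons j js ih =>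
    have hm : l.take j ++ sub ++ l.drop (j + sub.length) = l :=
      pvBuild_self l sub j (hjs j (List.mem_cons_self ..))
    simp only [List.foldl_cons, hm]
    rw [if_neg (by simp)]
    exact ih (fun x hx => hjs x (List.mem_cons_of_mem _ hx)) st

-- ===== VERDICT (by name: the statements are the Claim_ definitions above) =====
theorem get_all_possible_replacements_spec : Claim_equal_get_all_possible_replacements := by
  intro line replacements _ hnd
  unfold Spec_get_all_possible_replacements
  unfold get_all_possible_replacements get_all_possible_replacements_alt
  congr 1
  congr 1
  apply PySem.List.foldl_congr_mem
  intro st pr hpr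
  have hpr' : pr ∈ replacements := (PySem.List.mem_sorted _ _ _ _).mp hpr
  unfold Pre_get_all_possible_replacements at hnd
  rw [List.any_eq_false] at hnd
  have h := hnd pr hpr'
  set l := line.toList
  set sub := pr.1.toList
  by_cases heq : pr.1 = pr.2
  · -- sub = repl: B skips the rule, and A's inner fold leaves the state unchanged
    rw [if_pos heq]
    have hrepl : pr.2.toList = sub := by rw [← heq]
    rw [pvInner_eq l sub pr.2.toList _ st, hrepl]
    rw [pvInner_self l sub _ (fun j hj => (List.mem_of_mem_take hj)) st]
  · -- no self-overlap: count ≥ number of positions, the take is the full list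
    rw [if_neg heq]
    have hle : (pvPositions l sub).length ≤ PySem.Chars.count l sub := by
      apply pvCount_ge
      intro p q hp1 hq1 hpq
      by_contra hqlt
      simp only [not_le] at hqlt
      have hsne : sub ≠ [] := by
        intro hnil
        rw [hnil] at hqlt
        simp only [List.length_nil] at hqlt
        omega
      have hpl := pvPos_le hsne hp1
      have hql := pvPos_le hsne hq1
      have hslen : 1 ≤ sub.length := List.length_pos_iff.mpr hsne
      refine h ?_
      simp only [Bool.and_eq_true, decide_eq_true_eq]
      exact ⟨by simpa using heq, p, by omega, q, by omega, hpq, by omega, hp1, hq1⟩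
    rw [pvWhileAll l sub pr.2.toList st]
    rw [pvInner_eq l sub pr.2.toList _ st, List.take_of_length_le hle]
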